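-- pv_equiv track=rewrite | github.com/TanapTheTimid/mic-statistics | mic.py | getClumpsPartition
-- ===== SOURCE A (Python) =====
-- def getClumpsPartition(D, Q):
--     curr_clump = Q[(D[0][0], D[0][1])]
--     cluster = [0]
--     for idx, point in enumerate(D):
--         point = (point[0], point[1])
--         clump = Q[point]
--         if clump != curr_clump:
--             curr_clump = clump
--             cluster = cluster + [idx]
--     cluster = cluster + [len(D)]
--     return cluster
-- ===== SOURCE B (Python) =====
-- def getClumpsPartition(D, Q):
--     n = len(D)
--     cuts = [0]
--     i = 0
--     while i < n:
--         run_label = Q[(D[i][0], D[i][1])]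
--         j = i + 1
--         while j < n and Q[(D[j][0], D[j][1])] == run_label:
--             j += 1
--         cuts.append(j)
--         i = j
--     return cuts
-- ===== Notes on version B (the rewrite author's own statement) =====
-- stated objective: alternative
-- what changed: Replaces A's single pass that compares each point's label with a running curr_clump and collects change indices by repeated list concatenation with a two-pointer run scan: an inner while loop advances to the end of each equal-label run (comparing against the run's first label) and the outer loop appends run-end positions to the cuts list.
import Mathlib
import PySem

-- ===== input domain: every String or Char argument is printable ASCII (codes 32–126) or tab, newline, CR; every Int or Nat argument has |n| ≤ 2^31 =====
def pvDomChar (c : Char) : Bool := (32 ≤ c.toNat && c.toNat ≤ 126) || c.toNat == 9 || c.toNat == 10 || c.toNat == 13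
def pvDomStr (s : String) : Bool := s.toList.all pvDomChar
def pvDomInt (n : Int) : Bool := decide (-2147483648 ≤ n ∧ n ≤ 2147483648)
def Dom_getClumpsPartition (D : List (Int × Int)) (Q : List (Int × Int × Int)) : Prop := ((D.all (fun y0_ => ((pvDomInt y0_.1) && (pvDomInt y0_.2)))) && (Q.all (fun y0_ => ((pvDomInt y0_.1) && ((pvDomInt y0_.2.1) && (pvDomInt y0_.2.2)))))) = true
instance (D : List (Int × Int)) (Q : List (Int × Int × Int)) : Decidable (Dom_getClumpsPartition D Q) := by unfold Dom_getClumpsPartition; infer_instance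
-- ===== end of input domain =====

-- B replaces A's single pass (compare each label with a running curr_clump, collect change
-- indices) by a two-pointer run scan: an inner loop advances to the end of each equal-label
-- run and the run-end positions are appended (alternative decomposition; equal on Pre_).

-- shared input decoding: the Python dict Q (keyed by point pairs) arrives as a triple list
def pvQDict (Q : List (Int × Int × Int)) : PySem.Dict (Int × Int) Int :=
  PySem.Dict.ofList (Q.map (fun t => ((t.1, t.2.1), t.2.2)))

-- ===== PORT A =====
def getClumpsPartition (D : List (Int × Int)) (Q : List (Int × Int × Int)) : List Int :=
  let qd := pvQDict Q
  match D with
  | [] => []   -- Python raises IndexError on D[0] here; excluded by Pre_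
  | p0 :: _ =>
    let s := (PySem.List.enumerate D 0).foldl
      (fun (s : Int × List Int) ip =>
        let clump := qd.getD (ip.2.1, ip.2.2) 0   -- KeyError excluded by Pre_
        if clump ≠ s.1 then (clump, s.2 ++ [ip.1]) else s)
      (qd.getD (p0.1, p0.2) 0, [0])
    s.2 ++ [(D.length : Int)]

-- ===== PORT B =====
-- inner while loop of Source B: advance j while j < n and label(D[j]) == run_label
def pvRunEnd (f : Int × Int → Int) (D : List (Int × Int)) (l : Int) (j : Nat) : Nat :=
  if h : j < D.length ∧ f (D.getD j (0, 0)) = l then pvRunEnd f D l (j + 1) else j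
termination_by D.length - j
decreasing_by omega

theorem pvRunEnd_ge (f : Int × Int → Int) (D : List (Int × Int)) (l : Int) :
    ∀ j, j ≤ pvRunEnd f D l j := by
  intro j
  fun_induction pvRunEnd f D l j with
  | case1 j h ih => omega
  | case2 j _ => omega

-- outer while loop of Source B, appending each run end to cuts
def pvOuter (f : Int × Int → Int) (D : List (Int × Int)) (i : Nat) (acc : List Int) : List Int :=
  if h : i < D.length then
    let j := pvRunEnd f D (f (D.getD i (0, 0))) (i + 1)
    pvOuter f D j (acc ++ [(j : Int)])
  else acc
termination_by D.length - i
decreasing_by have := pvRunEnd_ge f D (f (D.getD i (0, 0))) (i + 1); omega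

def getClumpsPartition_alt (D : List (Int × Int)) (Q : List (Int × Int × Int)) : List Int :=
  let qd := pvQDict Q
  pvOuter (fun p => qd.getD (p.1, p.2) 0) D 0 [0]   -- KeyError excluded by Pre_

-- ===== PRECONDITION & SPEC =====
-- Pre_: exactly where Python A returns normally — D nonempty (else IndexError) and
-- every point of D present as a key of Q (else KeyError).
def Pre_getClumpsPartition (D : List (Int × Int)) (Q : List (Int × Int × Int)) : Prop :=
  D ≠ [] ∧ (D.all (fun p => Q.any (fun t => t.1 == p.1 && t.2.1 == p.2))) = true
instance (D : List (Int × Int)) (Q : List (Int × Int × Int)) : Decidable (Pre_getClumpsPartition D Q) := by unfold Pre_getClumpsPartition; infer_instance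

def pvWitness_getClumpsPartition : (List (Int × Int)) × (List (Int × Int × Int)) :=
  ([(0, 0), (1, 1), (2, 2)], [(0, 0, 5), (1, 1, 5), (2, 2, 7)])

def Spec_getClumpsPartition (D : List (Int × Int)) (Q : List (Int × Int × Int)) (out : List Int) : Prop := out = getClumpsPartition_alt D Q
instance (D : List (Int × Int)) (Q : List (Int × Int × Int)) (out : List Int) : Decidable (Spec_getClumpsPartition D Q out) := by unfold Spec_getClumpsPartition; infer_instance

-- ===== CLAIM (what is proved, stated in full; the proofs are below) =====
def Claim_equal_getClumpsPartition : Prop := ∀ (D : List (Int × Int)) (Q : List (Int × Int × Int)), Dom_getClumpsPartition D Q → Pre_getClumpsPartition D Q → Spec_getClumpsPartition D Q (getClumpsPartition D Q)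


-- ===== LEMMAS AND PROOFS =====

-- A's fold collects exactly the indices whose label differs from its predecessor's
-- (the zip of labels with its tail, shifted to start at the first element processed).
theorem pvLoop_eq (f : Int × Int → Int) :
    ∀ (L : List (Int × Int)) (c : Int) (acc : List Int) (k : Int),
      ((PySem.List.enumerate L k).foldl
        (fun (s : Int × List Int) ip =>
          if f ip.2 ≠ s.1 then (f ip.2, s.2 ++ [ip.1]) else s)
        (c, acc)).2
      = acc ++ ((PySem.List.enumerate ((c :: L.map f).zip (L.map f)) k).filter
          (fun x => x.2.1 != x.2.2)).map (·.1) := by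
  intro L
  induction L with
  | nil => intro c acc k; simp [PySem.List.enumerate_nil]
  | cons p rest ih =>
    intro c acc k
    simp only [PySem.List.enumerate_cons, List.map_cons, List.zip_cons_cons, List.foldl_cons]
    by_cases h : f p = c
    · rw [if_neg (by simp [h]), ih c acc (k + 1)]
      simp [h]
    · rw [if_pos h, ih (f p) (acc ++ [k]) (k + 1)]
      simp [bne_iff_ne, Ne.symm h]

-- canonical run ends of a label list (positions counted from k, as Ints)
def pvEnds : List Int → Int → List Int
  | [], _ => []
  | c :: ls, k =>
      let t := (ls.takeWhile (fun x => x == c)).length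
      (k + 1 + t) :: pvEnds (ls.drop t) (k + 1 + t)
termination_by ls => ls.length
decreasing_by simp [List.length_drop]

theorem pvEnds_nil (k : Int) : pvEnds [] k = [] := by
  rw [pvEnds]

theorem pvEnds_cons (c : Int) (ls : List Int) (k : Int) :
    pvEnds (c :: ls) k
    = (k + 1 + ((ls.takeWhile (fun x => x == c)).length : Int))
        :: pvEnds (ls.drop (ls.takeWhile (fun x => x == c)).length)
             (k + 1 + ((ls.takeWhile (fun x => x == c)).length : Int)) := by
  rw [pvEnds]

-- the inner while loop computes j + length of the equal-label prefix of drop j D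
theorem pvRunEnd_eq (f : Int × Int → Int) (D : List (Int × Int)) (l : Int) :
    ∀ j, pvRunEnd f D l j = j + (((D.drop j).map f).takeWhile (fun x => x == l)).length := by
  intro j
  fun_induction pvRunEnd f D l j with
  | case1 j h ih =>
    obtain ⟨hj, hl⟩ := h
    rw [List.drop_eq_getElem_cons hj]
    simp only [List.map_cons, List.takeWhile_cons]
    rw [List.getD_eq_getElem D (0,0) hj] at hl
    simp [hl, ih]
    try omega
  | case2 j h =>
    by_cases hj : j < D.length
    · rw [List.drop_eq_getElem_cons hj]
      simp only [List.map_cons, List.takeWhile_cons]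
      rw [List.getD_eq_getElem D (0,0) hj] at h
      have : ¬ f D[j] = l := by tauto
      simp [this]
    · rw [List.drop_eq_nil_of_le (by omega)]
      simp

-- the outer while loop appends the run ends of the remaining suffix
theorem pvOuter_eq (f : Int × Int → Int) (D : List (Int × Int)) :
    ∀ i acc, pvOuter f D i acc = acc ++ pvEnds ((D.drop i).map f) i := by
  intro i acc
  fun_induction pvOuter f D i acc with
  | case1 i acc h j ih =>
    rw [ih]
    have hj : j = i + 1 + (((D.drop (i+1)).map f).takeWhile
        (fun x => x == f (D.getD i (0,0)))).length := pvRunEnd_eq f D _ (i + 1)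
    rw [List.drop_eq_getElem_cons h, List.map_cons]
    rw [List.getD_eq_getElem D (0,0) h] at hj
    rw [pvEnds_cons]
    set t := (((D.drop (i+1)).map f).takeWhile (fun x => x == f D[i])).length with ht
    have hjt : j = i + 1 + t := hj
    have h1 : ((i : Int) + 1 + (t : Int)) = ((j : Nat) : Int) := by rw [hjt]; push_cast; ring
    have h2 : List.drop t (List.map f (List.drop (i + 1) D)) = List.map f (List.drop j D) := by
      rw [← List.map_drop, List.drop_drop]
      congr 2
      omega
    rw [h1, h2, List.append_assoc]
    simp
  | case2 i acc h =>
    rw [List.drop_eq_nil_of_le (by omega)]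
    simp [pvEnds_nil]

-- run ends = interior change positions ++ final length (bridges pvEnds to A's filter form)
theorem pvEnds_cons_eq_same (c b : Int) (rest : List Int) (k : Int) (hb : b = c) :
    pvEnds (c :: b :: rest) k = pvEnds (b :: rest) (k + 1) := by
  rw [pvEnds_cons, pvEnds_cons]
  simp only [List.takeWhile_cons, hb]
  simp only [beq_self_eq_true, if_true]
  simp [List.length_cons]
  ring_nf
  exact ⟨trivial, trivial⟩

theorem pvEnds_eq_filter (ls : List Int) :
    ∀ (c : Int) (k : Int),
      pvEnds (c :: ls) k
      = (((PySem.List.enumerate ((c :: ls).zip ls) (k + 1)).filter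
            (fun x => x.2.1 != x.2.2)).map (·.1)) ++ [k + 1 + ls.length] := by
  induction ls with
  | nil =>
    intro c k
    rw [pvEnds_cons]
    simp [PySem.List.enumerate_nil, pvEnds_nil]
  | cons b rest ih =>
    intro c k
    by_cases hb : b = c
    · rw [pvEnds_cons_eq_same c b rest k hb, ih b (k + 1)]
      subst hb
      simp only [List.zip_cons_cons, PySem.List.enumerate_cons]
      rw [List.filter_cons]
      simp [List.length_cons]
      ring_nf
    · -- change at the head: run has length 1
      rw [pvEnds_cons]
      rw [List.takeWhile_cons_of_neg (by simp [hb])]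
      simp only [List.length_nil, Nat.cast_zero, List.drop_zero, add_zero]
      rw [ih b (k + 1)]
      simp only [List.zip_cons_cons, PySem.List.enumerate_cons]
      rw [List.filter_cons]
      have : ((c, b).1 != (c, b).2) = true := by simp [bne_iff_ne]; exact Ne.symm hb
      simp [this, List.length_cons]
      ring_nf

theorem getClumpsPartition_spec : Claim_equal_getClumpsPartition := by
  intro D Q _ hPre
  unfold Spec_getClumpsPartition getClumpsPartition getClumpsPartition_alt
  obtain ⟨hne, _⟩ := hPre
  match D with
  | [] => exact absurd rfl hne
  | p0 :: rest =>
    dsimp only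
    rw [PySem.List.enumerate_cons, List.foldl_cons]
    rw [if_neg (by simp)]
    rw [pvLoop_eq (fun p => (pvQDict Q).getD (p.1, p.2) 0) rest _ [0] (0 + 1)]
    rw [pvOuter_eq, List.drop_zero, List.map_cons, Nat.cast_zero,
        pvEnds_eq_filter (rest.map fun p => (pvQDict Q).getD (p.1, p.2) 0) _ 0]
    simp
    ring_nf
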